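-- pv_equiv track=rewrite | github.com/4923/Algorithm | BOJ/11_Brute-force/5_1436_movie-director.py | endNum
-- ===== SOURCE A (Python) =====
-- def isEndNum(number):  # input : list
--     cnt = 0
--     for digit in number:
--         if digit == '6': cnt += 1
--         if cnt == 3: return True
--
-- def endNum(seriesNum):
--     temp, cnt  = 0, 0
--     while True:
--         cnt += 1
--         # 6이 포함된 수가 생길 때 마다, 그 6을 666의 첫 자리로 생각
--         if '6' in list(str(cnt)):
--             temp += 1
--             # N번째 6이 들어간 수일 때
--             if temp == seriesNum:
--                 endNum = list(str(cnt))
--                 # 종말의 수로 변경 (6을 666으로)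
--                 for idx in range(len(endNum)):
--                     if endNum[idx] == '6' and not isEndNum(endNum):
--                         endNum.insert(idx+1, '6')
--                         endNum.insert(idx+2, '6')
--                 return ''.join(endNum)
-- ===== SOURCE B (Python) =====
-- def _no_six(n):
--     # True iff the decimal digits of n (n >= 0) contain no '6'
--     while n > 0:
--         if n % 10 == 6:
--             return False
--         n //= 10
--     return True
--
--
-- def _no_six_count(n):
--     # how many k in [0, n] have no digit '6' (digit-by-digit closed form, O(log n))
--     if n < 10:
--         return n + 1 - (1 if n >= 6 else 0)
--     q, r = divmod(n, 10)
--     top = (r + 1 - (1 if r >= 6 else 0)) if _no_six(q) else 0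
--     return 9 * _no_six_count(q - 1) + top
--
--
-- def _count6(n):
--     # how many k in [1, n] contain the digit '6'
--     return n + 1 - _no_six_count(n)
--
--
-- def _nth_with_six(s):
--     # smallest x >= 1 with _count6(x) >= s, by binary search on the monotone counter
--     hi = 10
--     while _count6(hi) < s:
--         hi *= 10
--     lo = 1
--     while lo < hi:
--         mid = (lo + hi) // 2
--         if _count6(mid) >= s:
--             hi = mid
--         else:
--             lo = mid + 1
--     return lo
--
--
-- def endNum(seriesNum):
--     x = _nth_with_six(seriesNum)
--     digits = list(str(x))
--     # the mangling: insert '66' right after the first '6' unless there are already three sixes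
--     if digits.count('6') < 3:
--         i = digits.index('6')
--         digits = digits[:i + 1] + ['6', '6'] + digits[i + 1:]
--     return ''.join(digits)
-- ===== Notes on version B (the rewrite author's own statement) =====
-- stated objective: faster
-- what changed: A scans every integer 1,2,3,... testing str(cnt) for a '6' until the seriesNum-th hit; B computes how many numbers in [1,x] contain a '6' with a digit-by-digit closed-form counter and binary-searches the smallest such x, then inserts '66' after the first '6' directly instead of A's index-shifting insert loop.
import Mathlib
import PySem

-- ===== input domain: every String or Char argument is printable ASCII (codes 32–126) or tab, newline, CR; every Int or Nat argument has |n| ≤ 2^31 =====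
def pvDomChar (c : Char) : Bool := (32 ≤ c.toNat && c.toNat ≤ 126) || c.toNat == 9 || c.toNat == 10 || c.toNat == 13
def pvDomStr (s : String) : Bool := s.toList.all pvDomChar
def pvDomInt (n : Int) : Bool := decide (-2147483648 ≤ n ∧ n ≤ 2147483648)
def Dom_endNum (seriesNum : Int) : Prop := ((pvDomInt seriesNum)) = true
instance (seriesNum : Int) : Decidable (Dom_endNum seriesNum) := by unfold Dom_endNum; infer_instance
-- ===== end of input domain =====

-- B replaces A's one-by-one scan of all integers with a digit-by-digit counting
-- formula inverted by binary search (measured much faster); return values agree.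

-- ===== PORT A =====
-- isEndNum: Python returns True / None; ported as Bool (only its truthiness is used)
def isEndNumGo : List Char → Int → Bool
  | [], _ => false
  | d :: rest, cnt =>
    let cnt := if d = '6' then cnt + 1 else cnt
    if cnt = 3 then true else isEndNumGo rest cnt

def isEndNum (number : List Char) : Bool := isEndNumGo number 0

-- one iteration of the 'for idx in range(len(endNum))' loop; endNum[idx] is always
-- in range (the list only grows), so List.getD is exact here
def mangleStepA (acc : List Char) (idx : Nat) : List Char :=
  if acc.getD idx ' ' = '6' ∧ ¬ (isEndNum acc = true) then
    PySem.List.insert (PySem.List.insert acc ((idx : Int) + 1) '6') ((idx : Int) + 2) '6'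
  else acc

def mangleA (l : List Char) : List Char :=
  (List.range l.length).foldl mangleStepA l

-- the 'while True' loop; fuel only makes the recursion total, it is never exhausted
-- when 1 ≤ seriesNum (proved below)
def endNumLoop (seriesNum : Int) : Nat → Int → Int → String
  | 0, _, _ => ""
  | fuel + 1, cnt, temp =>
    let cnt := cnt + 1
    if '6' ∈ (PySem.Int.toStr cnt).toList then
      if temp + 1 = seriesNum then
        String.ofList (mangleA (PySem.Int.toStr cnt).toList)
      else endNumLoop seriesNum fuel cnt (temp + 1)
    else endNumLoop seriesNum fuel cnt temp

def endNum (seriesNum : Int) : String :=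
  endNumLoop seriesNum (10 * seriesNum.toNat + 10) 0 0

-- ===== PORT B =====
lemma pvToNat_floordiv_lt {n : Int} (h : 0 < n) :
    (PySem.Int.floordiv n 10).toNat < n.toNat := by
  rw [PySem.Int.floordiv_eq_ediv_of_pos (by norm_num)]
  omega

def hasNoSix (n : Int) : Bool :=
  if h : 0 < n then
    if PySem.Int.mod n 10 = 6 then false else hasNoSix (PySem.Int.floordiv n 10)
  else true
termination_by n.toNat
decreasing_by exact pvToNat_floordiv_lt h

lemma pvToNat_floordiv_sub_one_lt {n : Int} (h : ¬ n < 10) :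
    (PySem.Int.floordiv n 10 - 1).toNat < n.toNat := by
  rw [PySem.Int.floordiv_eq_ediv_of_pos (by norm_num)]
  omega

def noSixCount (n : Int) : Int :=
  if h : n < 10 then n + 1 - (if n ≥ 6 then 1 else 0)
  else
    let q := PySem.Int.floordiv n 10
    let r := PySem.Int.mod n 10
    let top := if hasNoSix q then r + 1 - (if r ≥ 6 then 1 else 0) else 0
    9 * noSixCount (q - 1) + top
termination_by n.toNat
decreasing_by exact pvToNat_floordiv_sub_one_lt h

def count6I (n : Int) : Int := n + 1 - noSixCount n

-- 'while _count6(hi) < s: hi *= 10'; fuel 64 only makes it total, it is never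
-- exhausted on the stated domain (proved below)
def growHi (s : Int) : Nat → Int → Int
  | 0, hi => hi
  | fuel + 1, hi => if count6I hi < s then growHi s fuel (hi * 10) else hi

lemma pvMid_bounds {lo hi : Int} (h : lo < hi) :
    lo ≤ PySem.Int.floordiv (lo + hi) 2 ∧ PySem.Int.floordiv (lo + hi) 2 < hi :=
  ⟨(PySem.Int.floordiv_two_mid_bounds (le_of_lt h)).1,
   (PySem.Int.floordiv_lt_iff_lt_mul (by norm_num)).mpr (by omega)⟩

def bsearch (s lo hi : Int) : Int :=
  if h : lo < hi then
    let mid := PySem.Int.floordiv (lo + hi) 2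
    if count6I mid ≥ s then bsearch s lo mid else bsearch s (mid + 1) hi
  else lo
termination_by (hi - lo).toNat
decreasing_by
  · have := pvMid_bounds h; omega
  · have := pvMid_bounds h; omega

def nthWithSix (s : Int) : Int := bsearch s 1 (growHi s 64 10)

-- digits.index('6') cannot fail under Pre_ (the found number contains a '6'),
-- so the .getD 0 default is never used there
def mangleB (l : List Char) : List Char :=
  if l.count '6' < 3 then
    let i := (PySem.List.index? l '6').getD 0
    l.take (i + 1) ++ ['6', '6'] ++ l.drop (i + 1)
  else l

def endNum_alt (seriesNum : Int) : String :=
  String.ofList (mangleB (PySem.Int.toStr (nthWithSix seriesNum)).toList)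

-- ===== PRECONDITION & SPEC =====
-- A loops forever ('while True' never met) when seriesNum < 1; Pre_ excludes exactly those inputs.
def Pre_endNum (seriesNum : Int) : Prop := 1 ≤ seriesNum
instance (seriesNum : Int) : Decidable (Pre_endNum seriesNum) := by unfold Pre_endNum; infer_instance

def pvWitness_endNum : Int := 2

def Spec_endNum (seriesNum : Int) (out : String) : Prop := out = endNum_alt seriesNum
instance (seriesNum : Int) (out : String) : Decidable (Spec_endNum seriesNum out) := by unfold Spec_endNum; infer_instance

-- ===== CLAIM (what is proved, stated in full; the proofs are below) =====
def Claim_equal_endNum : Prop := ∀ (seriesNum : Int), Dom_endNum seriesNum → Pre_endNum seriesNum → Spec_endNum seriesNum (endNum seriesNum)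

-- ===== LEMMAS AND PROOFS =====

def sixFree (n : Nat) : Bool :=
  if h : n < 10 then decide (n ≠ 6)
  else decide (n % 10 ≠ 6) && sixFree (n / 10)
termination_by n
decreasing_by exact Nat.div_lt_self (by omega) (by norm_num)

def NS (n : Nat) : Nat := (List.range n).countP (fun k => sixFree k)
def CC (n : Nat) : Nat := (List.range n).countP (fun k => ! sixFree k)

lemma sixFree_lt (n : Nat) (h : n < 10) : sixFree n = decide (n ≠ 6) := by
  rw [sixFree]; simp [h]

lemma sixFree_ge (n : Nat) (h : ¬ n < 10) :
    sixFree n = (decide (n % 10 ≠ 6) && sixFree (n / 10)) := by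
  rw [sixFree]; simp [h]

lemma sixFree_decade (p d : Nat) (hd : d < 10) :
    sixFree (10 * p + d) = (sixFree p && decide (d ≠ 6)) := by
  rcases Nat.eq_zero_or_pos p with hp | hp
  · subst hp
    simp only [Nat.mul_zero, Nat.zero_add]
    rw [sixFree_lt d hd, sixFree_lt 0 (by norm_num)]
    simp
  · have h10 : ¬ 10 * p + d < 10 := by omega
    rw [sixFree_ge _ h10]
    have h1 : (10 * p + d) % 10 = d := by omega
    have h2 : (10 * p + d) / 10 = p := by omega
    rw [h1, h2, Bool.and_comm]

lemma NS_add_CC (n : Nat) : CC n + NS n = n := by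
  unfold CC NS
  have h := List.length_eq_countP_add_countP (fun k => ! sixFree k) (l := List.range n)
  simp at h ⊢
  omega

lemma CC_succ (n : Nat) : CC (n + 1) = CC n + (if sixFree n then 0 else 1) := by
  unfold CC
  rw [List.range_succ, List.countP_append]
  simp [List.countP_cons]
  cases h : sixFree n <;> simp [h]

lemma CC_mono {m n : Nat} (h : m ≤ n) : CC m ≤ CC n := by
  induction h with
  | refl => exact le_rfl
  | step _ ih => rw [CC_succ]; omega

lemma NS_succ (n : Nat) : NS (n + 1) = NS n + (if sixFree n then 1 else 0) := by
  unfold NS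
  rw [List.range_succ, List.countP_append]
  cases h : sixFree n <;> simp [h]

lemma countP_range_ne_six (d : Nat) (hd : d ≤ 10) :
    (List.range d).countP (fun x => decide (x ≠ 6)) = d - (if 7 ≤ d then 1 else 0) := by
  interval_cases d <;> decide

lemma NS_split (q d : Nat) :
    NS (10 * q + d) = NS (10 * q) + (List.range d).countP (fun x => sixFree (10 * q + x)) := by
  unfold NS
  rw [List.range_add, List.countP_append, List.countP_map]
  rfl

lemma CC_split (q d : Nat) :
    CC (10 * q + d) = CC (10 * q) + (List.range d).countP (fun x => ! sixFree (10 * q + x)) := by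
  unfold CC
  rw [List.range_add, List.countP_append, List.countP_map]
  rfl

lemma countP_shift (q d : Nat) (hd : d ≤ 10) :
    (List.range d).countP (fun x => sixFree (10 * q + x)) =
      if sixFree q then d - (if 7 ≤ d then 1 else 0) else 0 := by
  have hcong : ∀ x ∈ List.range d, sixFree (10 * q + x) = (sixFree q && decide (x ≠ 6)) := by
    intro x hx
    exact sixFree_decade q x (by simp at hx; omega)
  cases h : sixFree q
  · simp only [Bool.false_eq_true, if_false]
    rw [List.countP_eq_zero]
    intro x hx
    rw [hcong x hx, h]
    simp
  · simp only [if_true]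
    rw [← countP_range_ne_six d hd]
    apply List.countP_congr
    intro x hx
    rw [hcong x hx, h]
    simp

lemma NS_decade (q : Nat) : NS (10 * q) = 9 * NS q := by
  induction q with
  | zero => simp [NS]
  | succ q ih =>
    have h10 : 10 * (q + 1) = 10 * q + 10 := by ring
    rw [h10, NS_split, countP_shift q 10 le_rfl, ih, NS_succ]
    cases h : sixFree q <;> simp <;> ring

lemma NS_decade_add (q d : Nat) (hd : d ≤ 10) :
    NS (10 * q + d) = 9 * NS q + (if sixFree q then d - (if 7 ≤ d then 1 else 0) else 0) := by
  rw [NS_split, countP_shift q d hd, NS_decade]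

lemma CC_ten_mul (t : Nat) : t ≤ CC (10 * t) := by
  induction t with
  | zero => simp
  | succ t ih =>
    have h10 : 10 * (t + 1) = 10 * t + 10 := by ring
    rw [h10, CC_split]
    have hpos : 0 < (List.range 10).countP (fun x => ! sixFree (10 * t + x)) := by
      rw [List.countP_pos_iff]
      refine ⟨6, by simp, ?_⟩
      rw [sixFree_decade t 6 (by norm_num)]
      simp
    omega

lemma toDigits_has_six (m : Nat) : ('6' ∈ Nat.toDigits 10 m) ↔ sixFree m = false := by
  induction m using Nat.strong_induction_on with
  | _ m ih =>
    by_cases h : m < 10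
    · rw [Nat.toDigits_of_lt_base h, sixFree_lt m h]
      interval_cases m <;> decide
    · rw [Nat.toDigits_of_base_le (by norm_num) (by omega), sixFree_ge m h,
        List.mem_append]
      have ih' := ih (m / 10) (Nat.div_lt_self (by omega) (by norm_num))
      have hr : m % 10 < 10 := Nat.mod_lt _ (by norm_num)
      have hd : ('6' ∈ [(m % 10).digitChar]) ↔ (m % 10 = 6) := by
        set r := m % 10 with hrr
        clear_value r
        interval_cases r <;> decide
      rw [ih', hd]
      by_cases h6 : m % 10 = 6 <;> cases hsf : sixFree (m / 10) <;> simp [h6, hsf]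

lemma toChars_has_six (n : Int) (h : 0 ≤ n) :
    ('6' ∈ (PySem.Int.toStr n).toList) ↔ sixFree n.toNat = false := by
  rw [PySem.Int.toList_toStr]
  unfold PySem.Int.toChars
  rw [if_neg (by omega)]
  exact toDigits_has_six n.toNat

lemma hasNoSix_eq (n : Int) (h : 0 ≤ n) : hasNoSix n = sixFree n.toNat := by
  induction hn : n.toNat using Nat.strong_induction_on generalizing n with
  | _ m ih =>
    rw [hasNoSix]
    by_cases hpos : 0 < n
    · rw [dif_pos hpos]
      rw [PySem.Int.mod_eq_emod_of_pos (by norm_num),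
        PySem.Int.floordiv_eq_ediv_of_pos (by norm_num)]
      have hq : (n / 10).toNat = n.toNat / 10 := by omega
      have hqlt : (n / 10).toNat < m := by
        subst hn; exact (by rw [hq]; exact Nat.div_lt_self (by omega) (by norm_num))
      have ihq := ih (n / 10).toNat hqlt (n / 10) (by omega) rfl
      by_cases h6 : n % 10 = 6
      · rw [if_pos h6]
        by_cases hlt : n.toNat < 10
        · rw [← hn] at *
          rw [sixFree_lt _ hlt]
          have h66 : n.toNat = 6 := by omega
          simp [h66]
        · rw [← hn] at *
          have h66 : n.toNat % 10 = 6 := by omega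
          rw [sixFree_ge _ hlt]
          simp [h66]
      · rw [if_neg h6, ihq, hq]
        by_cases hlt : n.toNat < 10
        · rw [← hn, sixFree_lt _ hlt]
          have : n.toNat / 10 = 0 := by omega
          rw [this, sixFree_lt 0 (by norm_num)]
          simp; omega
        · rw [← hn, sixFree_ge _ hlt]
          have : n.toNat % 10 ≠ 6 := by omega
          simp [this]
    · rw [dif_neg hpos]
      have : n.toNat = 0 := by omega
      rw [← hn, this, sixFree_lt 0 (by norm_num)]
      decide

lemma sixFree_zero : sixFree 0 = true := by
  rw [sixFree_lt 0 (by norm_num)]; decide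

lemma NS_small (d : Nat) (hd : d ≤ 10) : NS d = d - (if 7 ≤ d then 1 else 0) := by
  have := NS_decade_add 0 d hd
  simpa [sixFree_zero, NS] using this

lemma noSixCount_eq (n : Int) (h : 0 ≤ n) : noSixCount n = (NS (n.toNat + 1) : Int) := by
  induction hn : n.toNat using Nat.strong_induction_on generalizing n with
  | _ m ih =>
  subst hn
  rw [noSixCount]
  by_cases hlt : n < 10
  · rw [dif_pos hlt]
    rw [NS_small (n.toNat + 1) (by omega)]
    split_ifs <;> omega
  · rw [dif_neg hlt]
    have hq' : PySem.Int.floordiv n 10 = n / 10 :=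
      PySem.Int.floordiv_eq_ediv_of_pos (by norm_num)
    have hr' : PySem.Int.mod n 10 = n % 10 :=
      PySem.Int.mod_eq_emod_of_pos (by norm_num)
    simp only [hq', hr']
    have hqlt : (n / 10 - 1).toNat < n.toNat := by omega
    have ihq := ih (n / 10 - 1).toNat hqlt (n / 10 - 1) (by omega) rfl
    have hns : hasNoSix (n / 10) = sixFree (n / 10).toNat := hasNoSix_eq (n / 10) (by omega)
    have hsplit : n.toNat + 1 = 10 * (n / 10).toNat + ((n % 10).toNat + 1) := by omega
    rw [hsplit, NS_decade_add (n / 10).toNat ((n % 10).toNat + 1) (by omega)]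
    rw [ihq, hns]
    have he : (n / 10 - 1).toNat + 1 = (n / 10).toNat := by omega
    rw [he]
    split_ifs <;> omega

lemma count6I_eq (n : Int) (h : 0 ≤ n) : count6I n = (CC (n.toNat + 1) : Int) := by
  unfold count6I
  rw [noSixCount_eq n h]
  have := NS_add_CC (n.toNat + 1)
  omega

-- existence of a number whose six-count reaches s
lemma exists_CC (s : Nat) : ∃ x : Nat, s ≤ CC (x + 1) := by
  refine ⟨10 * s, le_trans (CC_ten_mul s) (CC_mono (by omega))⟩

-- the s-th number containing a six, as the least x with CC (x+1) ≥ s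
def nthSix (s : Nat) : Nat := Nat.find (exists_CC s)

lemma nthSix_unique (s x : Nat) (h1 : CC x < s) (h2 : s ≤ CC (x + 1)) : x = nthSix s := by
  unfold nthSix
  have hspec := Nat.find_spec (exists_CC s)
  rcases lt_trichotomy x (Nat.find (exists_CC s)) with h | h | h
  · exact absurd h2 (by simpa using Nat.find_min (exists_CC s) h)
  · exact h
  · exact absurd (le_trans hspec (CC_mono (show Nat.find (exists_CC s) + 1 ≤ x by omega))) (by omega)

lemma nthSix_not_sixFree (s : Nat) (hs : 1 ≤ s) : sixFree (nthSix s) = false := by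
  have hspec : s ≤ CC (nthSix s + 1) := Nat.find_spec (exists_CC s)
  have hlt : CC (nthSix s) < s := by
    rcases Nat.eq_zero_or_pos (nthSix s) with h0 | h0
    · rw [h0]; simpa [CC] using hs
    · have := Nat.find_min (exists_CC s) (show nthSix s - 1 < nthSix s by omega)
      simp only [not_le] at this
      have heq : nthSix s - 1 + 1 = nthSix s := by omega
      rwa [heq] at this
  have := CC_succ (nthSix s)
  cases h : sixFree (nthSix s)
  · rfl
  · rw [h] at this; simp at this; omega

lemma endNumLoop_spec (s : Int) (hs : 1 ≤ s) :
    ∀ (fuel : Nat) (cnt : Int), 0 ≤ cnt →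
      (CC (cnt.toNat + 1) : Int) < s → s.toNat ≤ CC (cnt.toNat + 1 + fuel) →
      endNumLoop s fuel cnt (CC (cnt.toNat + 1) : Int) =
        String.ofList (mangleA (PySem.Int.toStr ((nthSix s.toNat : Nat) : Int)).toList) := by
  intro fuel
  induction fuel with
  | zero =>
    intro cnt h0 h1 h2
    rw [Nat.add_zero] at h2
    exfalso
    omega
  | succ fuel ih =>
    intro cnt h0 h1 h2
    rw [endNumLoop]
    have hpos : (0 : Int) ≤ cnt + 1 := by omega
    have htn : (cnt + 1).toNat = cnt.toNat + 1 := by omega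
    by_cases h6 : '6' ∈ (PySem.Int.toStr (cnt + 1)).toList
    · have hsf : sixFree (cnt.toNat + 1) = false := by
        have := (toChars_has_six (cnt + 1) hpos).mp h6
        rwa [htn] at this
      have hstep : CC (cnt.toNat + 1 + 1) = CC (cnt.toNat + 1) + 1 := by
        rw [CC_succ, hsf]; simp
      rw [if_pos h6]
      by_cases heq : (CC (cnt.toNat + 1) : Int) + 1 = s
      · rw [if_pos heq]
        have hx : (cnt + 1).toNat = nthSix s.toNat := by
          apply nthSix_unique
          · rw [htn]; omega
          · rw [htn, hstep]; omega
        have hcast : cnt + 1 = ((nthSix s.toNat : Nat) : Int) := by omega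
        rw [hcast]
      · rw [if_neg heq]
        have hrw : (CC (cnt.toNat + 1) : Int) + 1 = (CC ((cnt + 1).toNat + 1) : Int) := by
          rw [htn, hstep]; push_cast; ring
        rw [hrw]
        apply ih (cnt + 1) hpos
        · rw [← hrw]; omega
        · rw [htn]
          have : cnt.toNat + 1 + 1 + fuel = cnt.toNat + 1 + (fuel + 1) := by ring
          rw [this]; exact h2
    · rw [if_neg h6]
      have hsf : sixFree (cnt.toNat + 1) = true := by
        rcases Bool.eq_false_or_eq_true (sixFree (cnt.toNat + 1)) with ht | hf
        · exact ht
        · exact absurd ((toChars_has_six (cnt + 1) hpos).mpr (by rw [htn]; exact hf)) h6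
      have hstep : CC (cnt.toNat + 1 + 1) = CC (cnt.toNat + 1) := by
        rw [CC_succ, hsf]; simp
      have hrw : (CC (cnt.toNat + 1) : Int) = (CC ((cnt + 1).toNat + 1) : Int) := by
        rw [htn, hstep]
      rw [hrw]
      apply ih (cnt + 1) hpos
      · rw [← hrw]; omega
      · rw [htn]
        have harith : cnt.toNat + 1 + 1 + fuel = cnt.toNat + 1 + (fuel + 1) := by omega
        rw [harith]
        exact h2

lemma bsearch_spec (s : Int) (hs : 1 ≤ s) :
    ∀ (n : Nat) (lo hi : Int), (hi - lo).toNat = n → 1 ≤ lo → lo ≤ hi →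
      (CC lo.toNat : Int) < s → s ≤ count6I hi →
      bsearch s lo hi = ((nthSix s.toNat : Nat) : Int) := by
  intro n
  induction n using Nat.strong_induction_on with
  | _ n ih =>
    intro lo hi hn h1 h2 h3 h4
    rw [bsearch]
    by_cases hlt : lo < hi
    · rw [dif_pos hlt]
      have hb := pvMid_bounds hlt
      by_cases hc : count6I (PySem.Int.floordiv (lo + hi) 2) ≥ s
      · rw [if_pos hc]
        exact ih (PySem.Int.floordiv (lo + hi) 2 - lo).toNat (by omega) lo _ rfl h1
          (by omega) h3 hc
      · rw [if_neg hc]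
        apply ih (hi - (PySem.Int.floordiv (lo + hi) 2 + 1)).toNat (by omega) _ hi rfl
          (by omega) (by omega) ?_ h4
        have hcc := count6I_eq (PySem.Int.floordiv (lo + hi) 2) (by omega)
        have htn : (PySem.Int.floordiv (lo + hi) 2 + 1).toNat =
            (PySem.Int.floordiv (lo + hi) 2).toNat + 1 := by omega
        rw [htn]
        omega
    · rw [dif_neg hlt]
      have heq : lo = hi := le_antisymm h2 (not_lt.mp hlt)
      have hcc := count6I_eq hi (by omega)
      have hx : lo.toNat = nthSix s.toNat := by
        apply nthSix_unique
        · omega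
        · have : lo.toNat + 1 = hi.toNat + 1 := by omega
          rw [this]; omega
      omega

lemma growHi_spec (s : Int) :
    ∀ (fuel : Nat) (hi : Int), 10 ≤ hi → s ≤ count6I (hi * 10 ^ fuel) →
      10 ≤ growHi s fuel hi ∧ s ≤ count6I (growHi s fuel hi) := by
  intro fuel
  induction fuel with
  | zero =>
    intro hi hhi hcount
    rw [growHi]
    simpa using ⟨hhi, by simpa using hcount⟩
  | succ fuel ih =>
    intro hi hhi hcount
    rw [growHi]
    by_cases hc : count6I hi < s
    · rw [if_pos hc]
      refine ih (hi * 10) (by nlinarith) ?_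
      have : hi * 10 * 10 ^ fuel = hi * 10 ^ (fuel + 1) := by ring
      rw [this]; exact hcount
    · rw [if_neg hc]
      exact ⟨hhi, not_lt.mp hc⟩

lemma isEndNumGo_iff (l : List Char) : ∀ (k : Int), 0 ≤ k → k < 3 →
    (isEndNumGo l k = true ↔ 3 ≤ k + l.count '6') := by
  induction l with
  | nil =>
    intro k h1 h2
    simp [isEndNumGo]
    omega
  | cons d rest ih =>
    intro k h1 h2
    rw [isEndNumGo]
    by_cases hd : d = '6'
    · simp only [hd, if_true]
      by_cases h3 : k + 1 = 3
      · rw [if_pos h3]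
        simp [List.count_cons]
        omega
      · rw [if_neg h3, ih (k + 1) (by omega) (by omega)]
        simp [List.count_cons]
        omega
    · simp only [if_neg hd]
      rw [if_neg (by omega), ih k h1 h2]
      simp [List.count_cons, hd]

lemma isEndNum_iff (l : List Char) : isEndNum l = true ↔ 3 ≤ l.count '6' := by
  unfold isEndNum
  rw [isEndNumGo_iff l 0 le_rfl (by norm_num)]
  omega

lemma foldl_fix {α β : Type} (f : α → β → α) (a : α) (xs : List β)
    (h : ∀ x ∈ xs, f a x = a) : xs.foldl f a = a := by
  induction xs with
  | nil => rfl
  | cons x xs ih =>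
    rw [List.foldl_cons, h x (List.mem_cons_self ..)]
    exact ih (fun y hy => h y (List.mem_cons_of_mem _ hy))

lemma mangle_eq (l : List Char) (h : '6' ∈ l) : mangleA l = mangleB l := by
  unfold mangleA mangleB
  by_cases h3 : l.count '6' < 3
  case neg =>
    rw [if_neg h3]
    apply foldl_fix
    intro idx _
    unfold mangleStepA
    rw [if_neg]
    rintro ⟨-, hne⟩
    exact hne ((isEndNum_iff l).mpr (by omega))
  case pos =>
    rw [if_pos h3]
    obtain ⟨i, hi⟩ := Option.isSome_iff_exists.mp
      ((PySem.List.index?_isSome_iff (xs := l) (v := '6')).mpr h)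
    obtain ⟨hilt, hieq, hipre⟩ := PySem.List.getElem_of_index?_eq_some hi
    rw [hi]
    simp only [Option.getD_some]
    have hrange : List.range l.length =
        (List.range i ++ [i]) ++ (List.range (l.length - (i + 1))).map (fun x => (i + 1) + x) := by
      rw [← List.range_succ, ← List.range_add]
      congr 1
      omega
    rw [hrange, List.foldl_append, List.foldl_append]
    have h1 : (List.range i).foldl mangleStepA l = l := by
      apply foldl_fix
      intro idx hidx
      simp only [List.mem_range] at hidx
      unfold mangleStepA
      rw [if_neg]
      rintro ⟨hg, -⟩
      exact hipre idx (by omega)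
        (by rw [← List.getD_eq_getElem l ' ' (by omega)]; exact hg)
    rw [h1]
    have h2 : List.foldl mangleStepA l [i] =
        l.take (i + 1) ++ '6' :: '6' :: l.drop (i + 1) := by
      simp only [List.foldl_cons, List.foldl_nil]
      unfold mangleStepA
      rw [if_pos ⟨by rw [List.getD_eq_getElem l ' ' hilt]; exact hieq,
        fun hEnd => absurd ((isEndNum_iff l).mp hEnd) (by omega)⟩]
      have e1 : PySem.List.insert l ((i : Int) + 1) '6' =
          l.take (i + 1) ++ '6' :: l.drop (i + 1) := by
        have := PySem.List.insert_natCast l (i + 1) '6' (by omega)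
        push_cast at this
        exact this
      rw [e1]
      have e2 := PySem.List.insert_natCast (l.take (i + 1) ++ '6' :: l.drop (i + 1))
        (i + 2) '6' (by simp; omega)
      push_cast at e2
      rw [e2]
      have hlen : (l.take (i + 1)).length = i + 1 := by simp; omega
      rw [List.take_append, List.drop_append, hlen]
      have c1 : i + 2 - (i + 1) = 1 := by omega
      rw [List.take_of_length_le (by omega), c1]
      simp
    rw [h2]
    have hcnt : (l.take (i + 1) ++ '6' :: '6' :: l.drop (i + 1)).count '6' = l.count '6' + 2 := by
      have hsum : (l.take (i + 1)).count '6' + (l.drop (i + 1)).count '6' = l.count '6' := by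
        rw [← List.count_append, List.take_append_drop]
      rw [List.count_append]
      simp [List.count_cons]
      omega
    have hassoc : l.take (i + 1) ++ ['6', '6'] ++ l.drop (i + 1) =
        l.take (i + 1) ++ '6' :: '6' :: l.drop (i + 1) := by simp
    rw [hassoc]
    apply foldl_fix
    intro idx hidx
    unfold mangleStepA
    rw [if_neg]
    rintro ⟨-, hne⟩
    apply hne
    apply (isEndNum_iff _).mpr
    rw [hcnt]
    have := List.count_pos_iff.mpr h
    omega

-- ===== VERDICT (by name: the statement is the Claim_ definition above) =====
lemma CC_one : CC 1 = 0 := by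
  rw [show (1 : Nat) = 0 + 1 from rfl, CC_succ 0, sixFree_zero]
  simp [CC]

theorem endNum_spec : Claim_equal_endNum := by
  unfold Claim_equal_endNum Spec_endNum
  intro s hdom hpre
  have hs : 1 ≤ s := hpre
  have hbig : s ≤ 2147483648 := by
    unfold Dom_endNum pvDomInt at hdom
    rw [decide_eq_true_iff] at hdom
    exact hdom.2
  -- A reaches the nthSix number
  have h0 : ((CC ((0 : Int).toNat + 1) : Nat) : Int) = 0 := by
    norm_num [CC_one]
  have hA : endNum s =
      String.ofList (mangleA (PySem.Int.toStr ((nthSix s.toNat : Nat) : Int)).toList) := by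
    unfold endNum
    have h := endNumLoop_spec s hs (10 * s.toNat + 10) 0 le_rfl
      (by rw [h0]; omega)
      (by
        have harith : (0 : Int).toNat + 1 + (10 * s.toNat + 10) = 10 * s.toNat + 11 := by omega
        rw [harith]
        exact le_trans (CC_ten_mul s.toNat) (CC_mono (by omega)))
    rw [h0] at h
    exact h
  -- B reaches the nthSix number
  have hbig10 : s ≤ count6I (10 * 10 ^ 64) := by
    have h1 : ((10 * 10 ^ 64 : Int)).toNat = 10 ^ 65 := by
      rw [show (10 * 10 ^ 64 : Int) = ((10 ^ 65 : Nat) : Int) by push_cast]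
      exact Int.toNat_natCast _
    rw [count6I_eq _ (by positivity), h1]
    have h2 : (10 : Nat) ^ 64 ≤ CC (10 ^ 65) := by
      have h := CC_ten_mul (10 ^ 64)
      have e : 10 * 10 ^ 64 = 10 ^ 65 := by norm_num
      rwa [e] at h
    have h3 : CC (10 ^ 65) ≤ CC (10 ^ 65 + 1) := CC_mono (by omega)
    have h4 : (2147483648 : Nat) ≤ 10 ^ 64 := by norm_num
    omega
  have hgrow := growHi_spec s 64 10 (by norm_num) hbig10
  have hBx : nthWithSix s = ((nthSix s.toNat : Nat) : Int) := by
    unfold nthWithSix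
    apply bsearch_spec s hs (growHi s 64 10 - 1).toNat 1 _ rfl le_rfl (by omega) ?_ hgrow.2
    have he : (1 : Int).toNat = 1 := rfl
    rw [he, CC_one]
    omega
  rw [hA]
  unfold endNum_alt
  rw [hBx]
  have hmem : '6' ∈ (PySem.Int.toStr ((nthSix s.toNat : Nat) : Int)).toList := by
    rw [toChars_has_six _ (by positivity)]
    have he : ((nthSix s.toNat : Nat) : Int).toNat = nthSix s.toNat := by omega
    rw [he]
    exact nthSix_not_sixFree s.toNat (by omega)
  rw [mangle_eq _ hmem]
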